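-- pv_equiv track=rewrite | github.com/Viole-Grace/AdNAN | preprocessing/helpers.py | remove_duplicates
-- ===== SOURCE A (Python) =====
-- def remove_duplicates(arr):
--
--     tokens = [arr]
--
--     new_tokens = []
--     s = " "
--     for phrases in tokens:
--         new_phrases = []
--         phrases = [phrase.split() for phrase in phrases]
--         for i in range(len(phrases)):
--             phrase = phrases[i]
--             if all([len(set(phrase).difference(phrases[j])) > 0 or i == j for j in range(len(phrases))]) :
--                 new_phrases.append(phrase)
--
--         new_phrases = [s.join(phrase) for phrase in new_phrases]
--         new_tokens.append(new_phrases)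
--
--     try:
--         if len(new_tokens[0]) == 0:
--             arr.sort(reverse=True)
--             return [arr[-1].strip()]
--     except:
--         pass
--
--     return new_tokens[0]
-- ===== SOURCE B (Python) =====
-- def remove_duplicates(arr):
--     words = [p.split() for p in arr]
--     n = len(arr)
--     # inverted index: word -> set of phrase indices containing it
--     index = {}
--     for j, ws in enumerate(words):
--         for w in ws:
--             index.setdefault(w, set()).add(j)
--     out = []
--     for i, ws in enumerate(words):
--         inter = set(range(n))
--         for w in ws:
--             inter &= index.get(w, set())
--         if all(k == i for k in inter):
--             out.append(" ".join(ws))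
--     if out:
--         return out
--     if arr:
--         arr.sort(reverse=True)
--         return [arr[-1].strip()]
--     return []
-- ===== Notes on version B (the rewrite author's own statement) =====
-- stated objective: faster
-- what changed: B builds an inverted index (word -> set of phrase indices) in one pass and decides whether to keep each phrase by intersecting the posting sets of its words, replacing A's all-pairs scan that recomputes a set difference for every ordered pair of phrases; the empty-result fallback (sort reverse, take last, strip) is kept.
import Mathlib
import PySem

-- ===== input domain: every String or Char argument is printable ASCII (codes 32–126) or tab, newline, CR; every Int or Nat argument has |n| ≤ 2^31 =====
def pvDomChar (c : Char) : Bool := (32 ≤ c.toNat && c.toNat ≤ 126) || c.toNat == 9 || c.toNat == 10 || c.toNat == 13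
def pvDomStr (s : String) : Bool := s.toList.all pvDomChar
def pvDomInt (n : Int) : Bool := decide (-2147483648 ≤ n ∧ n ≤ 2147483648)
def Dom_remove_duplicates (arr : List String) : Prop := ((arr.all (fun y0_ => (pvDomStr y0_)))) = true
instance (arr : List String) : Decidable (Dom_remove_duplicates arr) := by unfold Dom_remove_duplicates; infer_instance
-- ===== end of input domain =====

-- B replaces A's all-pairs set-difference scan by an inverted index (word -> posting set of
-- phrase indices) intersected per phrase; return-value equivalence only (A sorts arr in place
-- on its empty-result branch, B performs the same sort in Python).


-- ===== PORT A =====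
def remove_duplicates (arr : List String) : List String :=
  let tokens : List (List String) := [arr]
  let new_tokens : List (List String) :=
    tokens.foldl (fun new_tokens phrases =>
      let phrases := phrases.map PySem.Str.split₀
      let new_phrases : List (List String) :=
        (PySem.List.pyRange 0 (phrases.length : Int) 1).foldl (fun acc i =>
          let phrase := PySem.List.pyGetD phrases i []
          if ((PySem.List.pyRange 0 (phrases.length : Int) 1).map (fun j =>
                decide (0 < (PySem.Set.diff (PySem.Set.ofList phrase)
                              (PySem.List.pyGetD phrases j [])).length) || (i == j))).all id
          then acc ++ [phrase] else acc) []
      let new_phrases := new_phrases.map (fun phrase => PySem.Str.join " " phrase)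
      new_tokens ++ [new_phrases]) []
  -- try/except: new_tokens[0] always exists (tokens = [arr]); only arr[-1] can raise
  match PySem.List.pyGet? new_tokens 0 with
  | none => []  -- unreachable
  | some t0 =>
    if t0.length == 0 then
      -- arr.sort(reverse=True); return [arr[-1].strip()]
      match PySem.List.pyGet? (PySem.List.sorted arr (fun x => x) true) (-1) with
      | some last => [PySem.Str.strip last]
      | none => t0  -- IndexError on arr[-1]: except: pass; return new_tokens[0]
    else t0

-- ===== PORT B =====
def remove_duplicates_alt (arr : List String) : List String :=
  let words := arr.map PySem.Str.split₀
  let n : Int := (arr.length : Int)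
  -- index.setdefault(w, set()).add(j)  =  modify w with default empty set, adding j
  let index : PySem.Dict String (PySem.Set Int) :=
    (PySem.List.enumerate words 0).foldl (fun d jws =>
      jws.2.foldl (fun d w => d.modify w PySem.Set.empty (fun s => PySem.Set.add s jws.1)) d)
      PySem.Dict.empty
  let out : List String :=
    (PySem.List.enumerate words 0).foldl (fun out iws =>
      let inter := iws.2.foldl
        (fun inter w => PySem.Set.inter inter (index.getD w PySem.Set.empty))
        (PySem.Set.ofList (PySem.List.pyRange 0 n 1))
      if inter.all (fun k => k == iws.1) then out ++ [PySem.Str.join " " iws.2] else out) []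
  if out.length ≠ 0 then out
  else if arr.length ≠ 0 then
    [PySem.Str.strip (PySem.List.pyGetD (PySem.List.sorted arr (fun x => x) true) (-1) "")]
  else []

-- ===== PRECONDITION & SPEC =====
def Spec_remove_duplicates (arr : List String) (out : List String) : Prop := out = remove_duplicates_alt arr
instance (arr : List String) (out : List String) : Decidable (Spec_remove_duplicates arr out) := by unfold Spec_remove_duplicates; infer_instance

-- ===== CLAIM (what is proved, stated in full; the proofs are below) =====
def Claim_equal_remove_duplicates : Prop := ∀ (arr : List String), Dom_remove_duplicates arr → Spec_remove_duplicates arr (remove_duplicates arr)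

-- ===== LEMMAS AND PROOFS =====

theorem idx_inner_mem (ws : List String) (j : Int) (d : PySem.Dict String (PySem.Set Int)) (w : String) (k : Int) :
    k ∈ ((ws.foldl (fun d w => d.modify w PySem.Set.empty (fun s => PySem.Set.add s j)) d).getD w PySem.Set.empty)
    ↔ k ∈ d.getD w PySem.Set.empty ∨ (k = j ∧ w ∈ ws) := by
  induction ws generalizing d with
  | nil => simp
  | cons x ws ih =>
    simp only [List.foldl_cons, ih, PySem.Dict.getD_modify]
    by_cases hwx : w = x <;> simp [hwx, PySem.Set.mem_add] <;> tauto

theorem idx_mem (l : List (Int × List String)) (d : PySem.Dict String (PySem.Set Int)) (w : String) (k : Int) :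
    k ∈ ((l.foldl (fun d jws =>
          jws.2.foldl (fun d w => d.modify w PySem.Set.empty (fun s => PySem.Set.add s jws.1)) d) d).getD w PySem.Set.empty)
    ↔ k ∈ d.getD w PySem.Set.empty ∨ ∃ p ∈ l, k = p.1 ∧ w ∈ p.2 := by
  induction l generalizing d with
  | nil => simp
  | cons p l ih =>
    simp only [List.foldl_cons, ih, idx_inner_mem]
    simp
    tauto

theorem inter_fold_mem (post : String → PySem.Set Int) (ws : List String) (init : PySem.Set Int) (k : Int) :
    k ∈ ws.foldl (fun s w => PySem.Set.inter s (post w)) init ↔ k ∈ init ∧ ∀ w ∈ ws, k ∈ post w := by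
  induction ws generalizing init with
  | nil => simp
  | cons x ws ih =>
    simp only [List.foldl_cons, ih, PySem.Set.mem_inter]
    simp
    tauto

-- posting set membership, specialised to the index built from enumerate W 0
theorem post_mem (W : List (List String)) (w : String) (k : Int) :
    k ∈ (((PySem.List.enumerate W 0).foldl (fun d jws =>
          jws.2.foldl (fun d w => d.modify w PySem.Set.empty (fun s => PySem.Set.add s jws.1)) d)
          PySem.Dict.empty).getD w PySem.Set.empty)
    ↔ ∃ m : Nat, ∃ h : m < W.length, k = m ∧ w ∈ W[m] := by
  rw [idx_mem]
  simp only [PySem.Dict.getD_empty]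
  constructor
  · rintro (h | ⟨p, hp, rfl, hw⟩)
    · simp [PySem.Set.empty] at h
    · rw [PySem.List.mem_enumerate_iff] at hp
      obtain ⟨m, hm, rfl⟩ := hp
      exact ⟨m, hm, by simp, by simpa using hw⟩
  · rintro ⟨m, hm, rfl, hw⟩
    right
    refine ⟨((m : Int), W[m]), ?_, by simp, by simpa using hw⟩
    rw [PySem.List.mem_enumerate_iff]
    exact ⟨m, hm, by simp⟩

theorem cond_eq (W : List (List String)) (i : Int) (hi : 0 ≤ i) (hin : i < (W.length : Int)) :
    ((PySem.List.pyRange 0 (W.length : Int) 1).map (fun j =>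
        decide (0 < (PySem.Set.diff (PySem.Set.ofList (PySem.List.pyGetD W i []))
                      (PySem.List.pyGetD W j [])).length) || (i == j))).all id
    =
    ((PySem.List.pyGetD W i []).foldl
        (fun s w => PySem.Set.inter s
          ((((PySem.List.enumerate W 0).foldl (fun d jws =>
              jws.2.foldl (fun d w => d.modify w PySem.Set.empty (fun s => PySem.Set.add s jws.1)) d)
              PySem.Dict.empty)).getD w PySem.Set.empty))
        (PySem.Set.ofList (PySem.List.pyRange 0 (W.length : Int) 1))).all (fun k => k == i) := by
  rw [Bool.eq_iff_iff]
  rw [List.all_map]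
  simp only [List.all_eq_true, Function.comp]
  constructor
  · -- A → B
    intro hA k hk
    rw [inter_fold_mem] at hk
    obtain ⟨hk0, hsub⟩ := hk
    rw [PySem.Set.mem_ofList, PySem.List.mem_pyRange_one] at hk0
    have := hA k (by rw [PySem.List.mem_pyRange_one]; omega)
    simp only [id_eq, Bool.or_eq_true, decide_eq_true_eq, beq_iff_eq] at this ⊢
    rcases this with h | h
    · exfalso
      rw [List.length_pos_iff_exists_mem] at h
      obtain ⟨w, hw⟩ := h
      rw [PySem.Set.mem_diff, PySem.Set.mem_ofList] at hw
      obtain ⟨hw1, hw2⟩ := hw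
      have := hsub w hw1
      rw [post_mem] at this
      obtain ⟨m, hm, rfl, hwm⟩ := this
      apply hw2
      rw [PySem.List.pyGetD_eq_getElem W [] (by omega) (by exact_mod_cast hk0.2)]
      simpa [Int.toNat_natCast] using hwm
    · omega
  · -- B → A
    intro hB j hj
    rw [PySem.List.mem_pyRange_one] at hj
    simp only [id_eq, Bool.or_eq_true, decide_eq_true_eq, beq_iff_eq]
    by_cases hij : i = j
    · right; exact hij
    · left
      by_contra hnot
      rw [List.length_pos_iff_exists_mem] at hnot
      push Not at hnot
      have hjall : ∀ w ∈ PySem.List.pyGetD W i [], w ∈ PySem.List.pyGetD W j [] := by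
        intro w hw
        by_contra hwj
        exact hnot w (by rw [PySem.Set.mem_diff, PySem.Set.mem_ofList]; exact ⟨hw, hwj⟩)
      have hk : j ∈ (PySem.List.pyGetD W i []).foldl
          (fun s w => PySem.Set.inter s
            ((((PySem.List.enumerate W 0).foldl (fun d jws =>
                jws.2.foldl (fun d w => d.modify w PySem.Set.empty (fun s => PySem.Set.add s jws.1)) d)
                PySem.Dict.empty)).getD w PySem.Set.empty))
          (PySem.Set.ofList (PySem.List.pyRange 0 (W.length : Int) 1)) := by
        rw [inter_fold_mem]
        refine ⟨by rw [PySem.Set.mem_ofList, PySem.List.mem_pyRange_one]; omega, ?_⟩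
        intro w hw
        rw [post_mem]
        refine ⟨j.toNat, by omega, by omega, ?_⟩
        have := hjall w hw
        rwa [PySem.List.pyGetD_eq_getElem W [] (by omega) (by omega)] at this
      have := hB j hk
      rw [beq_iff_eq] at this
      exact hij this.symm

theorem lists_eq (W : List (List String)) (n : Int) (hn : n = (W.length : Int)) :
    List.map (fun phrase => PySem.Str.join " " phrase)
      (List.foldl (fun acc i =>
        if (List.map (fun j =>
              decide (0 < List.length ((PySem.Set.ofList (PySem.List.pyGetD W i [])).diff
                (PySem.List.pyGetD W j []))) || i == j) (PySem.List.pyRange 0 n)).all id = true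
        then acc ++ [PySem.List.pyGetD W i []] else acc) [] (PySem.List.pyRange 0 n))
    =
    List.foldl (fun out iws =>
        if (List.all (List.foldl (fun inter w =>
              PySem.Set.inter inter ((List.foldl (fun d jws =>
                  List.foldl (fun d w => d.modify w PySem.Set.empty fun s => PySem.Set.add s jws.1) d jws.2)
                PySem.Dict.empty (PySem.List.enumerate W)).getD w PySem.Set.empty))
              (PySem.Set.ofList (PySem.List.pyRange 0 n)) iws.2) fun k => k == iws.1) = true
        then out ++ [PySem.Str.join " " iws.2] else out) [] (PySem.List.enumerate W) := by
  subst hn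
  have hlen : PySem.List.len W = (W.length : Int) := by simp [PySem.List.len]
  rw [PySem.List.foldl_append_if, PySem.List.foldl_append_if]
  simp only [List.nil_append]
  rw [PySem.List.enumerate_eq_map_pyRange W [], hlen, List.filter_map, List.map_map, List.map_map]
  rw [List.filter_congr (fun j hj => ?_)]
  · rfl
  · rw [PySem.List.mem_pyRange_one] at hj
    have h := cond_eq W j hj.1 hj.2
    rw [PySem.List.enumerate_eq_map_pyRange W [], hlen] at h
    simpa using h

theorem main_eq (arr : List String) : remove_duplicates arr = remove_duplicates_alt arr := by
  have hW : (List.map PySem.Str.split₀ arr).length = arr.length := List.length_map ..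
  simp only [remove_duplicates, remove_duplicates_alt, List.foldl_cons, List.foldl_nil,
    List.nil_append]
  rw [hW]
  rw [lists_eq (List.map PySem.Str.split₀ arr) (arr.length : Int) (by rw [hW])]
  generalize (List.foldl _ ([] : List String) (PySem.List.enumerate (List.map PySem.Str.split₀ arr))) = L
  rw [show PySem.List.pyGet? [L] 0 = some L from rfl]
  cases L with
  | cons x xs => simp
  | nil =>
    simp only [List.length_nil]
    rw [PySem.List.pyGet?_neg_one]
    cases harr : arr with
    | nil => simp [PySem.List.sorted]
    | cons a as =>
      have hs : PySem.List.sorted (a :: as) (fun x => x) true ≠ [] := by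
        simp [Ne, PySem.List.sorted_eq_nil_iff]
      rw [List.getLast?_eq_some_getLast hs, PySem.List.pyGetD_neg_one _ _ hs]
      simp

-- ===== VERDICT (by name: the statement is the Claim_ definition above) =====
theorem remove_duplicates_spec : Claim_equal_remove_duplicates := by
  intro arr _
  exact main_eq arr
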